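-- pv_equiv track=rewrite | github.com/bcaitech1/p2-klue-deokisys | load_data.py | insert_ent_tag
-- ===== SOURCE A (Python) =====
-- def insert_ent_tag(text, ent1_start_idx, ent1_end_idx, ent2_start_idx, ent2_end_idx):
--     new_text = ''
--
--     for i, ch in enumerate(text):
--         if i == ent1_start_idx:
--             new_text += '[E1]'
--             new_text += ch
--
--             if ent1_start_idx == ent1_end_idx:
--                 new_text += '[/E1]'
--
--         elif i == ent1_end_idx:
--             new_text += ch
--             new_text += '[/E1]'
--
--         elif i == ent2_start_idx:
--             new_text += '[E2]'
--             new_text += ch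
--
--             if ent2_start_idx == ent2_end_idx:
--                 new_text += '[/E2]'
--
--         elif i == ent2_end_idx:
--             new_text += ch
--             new_text += '[/E2]'
--
--         else:
--             new_text += ch
--     return new_text
-- ===== SOURCE B (Python) =====
-- def insert_ent_tag(text, ent1_start_idx, ent1_end_idx, ent2_start_idx, ent2_end_idx):
--     n = len(text)
--     events = []
--     for idx, pre, post in ((ent1_start_idx, '[E1]', '[/E1]' if ent1_start_idx == ent1_end_idx else ''),
--                            (ent1_end_idx, '', '[/E1]'),
--                            (ent2_start_idx, '[E2]', '[/E2]' if ent2_start_idx == ent2_end_idx else ''),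
--                            (ent2_end_idx, '', '[/E2]')):
--         if 0 <= idx < n and all(p != idx for p, _, _ in events):
--             events.append((idx, pre, post))
--     events.sort(key=lambda e: e[0])
--     parts = []
--     prev = 0
--     for p, pre, post in events:
--         parts.append(text[prev:p] + pre + text[p] + post)
--         prev = p + 1
--     parts.append(text[prev:])
--     return ''.join(parts)
-- ===== Notes on version B (the rewrite author's own statement) =====
-- stated objective: faster
-- what changed: A scans the text character by character testing every position against the four indices; B computes the at-most-four claimed (position, pre-tag, post-tag) insertion events up front, sorts them, and splices slices of the text between them.
import Mathlib
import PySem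

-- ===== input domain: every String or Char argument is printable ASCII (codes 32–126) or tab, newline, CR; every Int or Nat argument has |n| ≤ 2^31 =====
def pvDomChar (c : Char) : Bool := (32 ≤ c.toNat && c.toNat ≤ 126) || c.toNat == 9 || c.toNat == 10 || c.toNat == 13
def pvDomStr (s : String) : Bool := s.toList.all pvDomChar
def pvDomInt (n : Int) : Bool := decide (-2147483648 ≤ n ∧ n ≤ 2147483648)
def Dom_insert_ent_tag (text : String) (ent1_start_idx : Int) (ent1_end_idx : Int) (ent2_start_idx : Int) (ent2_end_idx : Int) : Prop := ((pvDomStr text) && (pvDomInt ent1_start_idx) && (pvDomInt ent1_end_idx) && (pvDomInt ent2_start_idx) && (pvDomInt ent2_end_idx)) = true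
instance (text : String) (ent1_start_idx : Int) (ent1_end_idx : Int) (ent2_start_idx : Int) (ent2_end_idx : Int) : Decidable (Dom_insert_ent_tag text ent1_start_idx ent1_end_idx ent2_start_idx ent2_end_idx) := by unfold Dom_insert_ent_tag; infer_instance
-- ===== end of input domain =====

-- B replaces A's character-by-character scan by computing the (at most four) tag insertion
-- events up front and splicing slices of the text around them (objective: alternative).

-- ===== PORT A =====
-- literal port of A: one fold over enumerate(text), the elif chain kept in order
def insert_ent_tag (text : String) (ent1_start_idx : Int) (ent1_end_idx : Int) (ent2_start_idx : Int) (ent2_end_idx : Int) : String :=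
  String.mk ((PySem.List.enumerate text.toList 0).foldl
    (fun new_text ic =>
      if ic.1 = ent1_start_idx then
        new_text ++ "[E1]".toList ++ [ic.2] ++
          (if ent1_start_idx = ent1_end_idx then "[/E1]".toList else [])
      else if ic.1 = ent1_end_idx then
        new_text ++ [ic.2] ++ "[/E1]".toList
      else if ic.1 = ent2_start_idx then
        new_text ++ "[E2]".toList ++ [ic.2] ++
          (if ent2_start_idx = ent2_end_idx then "[/E2]".toList else [])
      else if ic.1 = ent2_end_idx then
        new_text ++ [ic.2] ++ "[/E2]".toList
      else new_text ++ [ic.2]) [])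

-- ===== PORT B =====
-- the body of Source B's candidate loop: record the candidate (position, pre-tag, post-tag)
-- if its position is in range and not already claimed by an earlier candidate
def bStep (n : Int) (evs : List (Int × List Char × List Char)) (cand : Int × List Char × List Char) :
    List (Int × List Char × List Char) :=
  if 0 ≤ cand.1 ∧ cand.1 < n ∧ evs.all (fun e => decide (e.1 ≠ cand.1)) then evs ++ [cand] else evs

-- the body of Source B's splice loop: append text[prev:p] + pre + text[p] + post, move prev to p+1
def spliceStep (cs : List Char) (st : List (List Char) × Int)
    (e : Int × List Char × List Char) : List (List Char) × Int :=
  (st.1 ++ [PySem.List.slice cs (some st.2) (some e.1) ++ e.2.1 ++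
             ((PySem.List.pyGet? cs e.1).elim [] (fun c => [c])) ++ e.2.2],
   e.1 + 1)

-- literal port of Source B: collect the claimed events from the four candidate indices,
-- sort them by position, then splice slices of the text between them and join
def insert_ent_tag_alt (text : String) (ent1_start_idx : Int) (ent1_end_idx : Int) (ent2_start_idx : Int) (ent2_end_idx : Int) : String :=
  let cs := text.toList
  let n : Int := PySem.List.len cs
  let cands : List (Int × List Char × List Char) :=
    [(ent1_start_idx, "[E1]".toList, if ent1_start_idx = ent1_end_idx then "[/E1]".toList else []),
     (ent1_end_idx, [], "[/E1]".toList),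
     (ent2_start_idx, "[E2]".toList, if ent2_start_idx = ent2_end_idx then "[/E2]".toList else []),
     (ent2_end_idx, [], "[/E2]".toList)]
  let events := cands.foldl (bStep n) []
  let sortedEvents := PySem.List.sorted events (fun e => e.1) false
  let r := sortedEvents.foldl (spliceStep cs) ([], 0)
  String.mk ((r.1 ++ [PySem.List.slice cs (some r.2) none]).flatten)

-- ===== PRECONDITION & SPEC =====
def Spec_insert_ent_tag (text : String) (ent1_start_idx : Int) (ent1_end_idx : Int) (ent2_start_idx : Int) (ent2_end_idx : Int) (out : String) : Prop := out = insert_ent_tag_alt text ent1_start_idx ent1_end_idx ent2_start_idx ent2_end_idx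
instance (text : String) (ent1_start_idx : Int) (ent1_end_idx : Int) (ent2_start_idx : Int) (ent2_end_idx : Int) (out : String) : Decidable (Spec_insert_ent_tag text ent1_start_idx ent1_end_idx ent2_start_idx ent2_end_idx out) := by unfold Spec_insert_ent_tag; infer_instance

-- ===== CLAIM (what is proved, stated in full; the proofs are below) =====
def Claim_equal_insert_ent_tag : Prop := ∀ (text : String) (ent1_start_idx : Int) (ent1_end_idx : Int) (ent2_start_idx : Int) (ent2_end_idx : Int), Dom_insert_ent_tag text ent1_start_idx ent1_end_idx ent2_start_idx ent2_end_idx → Spec_insert_ent_tag text ent1_start_idx ent1_end_idx ent2_start_idx ent2_end_idx (insert_ent_tag text ent1_start_idx ent1_end_idx ent2_start_idx ent2_end_idx)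

-- ===== LEMMAS AND PROOFS =====

-- the opening tag A inserts before position i (the elif priority made explicit)
def preTag (a b c d i : Int) : List Char :=
  if i = a then "[E1]".toList
  else if i = b then []
  else if i = c then "[E2]".toList
  else []

-- the closing tag A inserts after position i
def postTag (a b c d i : Int) : List Char :=
  if i = a then (if a = b then "[/E1]".toList else [])
  else if i = b then "[/E1]".toList
  else if i = c then (if c = d then "[/E2]".toList else [])
  else if i = d then "[/E2]".toList
  else []

-- what A emits for one enumerated character
def fTag (a b c d : Int) (p : Int × Char) : List Char :=
  preTag a b c d p.1 ++ [p.2] ++ postTag a b c d p.1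

-- A is the flatMap of fTag over the enumeration
theorem a_eq_flatMap (text : String) (a b c d : Int) :
    insert_ent_tag text a b c d =
      String.mk ((PySem.List.enumerate text.toList 0).flatMap (fTag a b c d)) := by
  unfold insert_ent_tag
  congr 1
  refine Eq.trans (PySem.List.foldl_congr_mem _ _ (fun acc p => acc ++ fTag a b c d p) _ ?_) ?_
  · intro acc p _
    simp only [fTag, preTag, postTag]
    split_ifs <;> simp_all
  · simpa using PySem.List.foldl_append_eq_flatMap (fTag a b c d) (PySem.List.enumerate text.toList 0) []

-- a region carrying no tags flattens to itself
theorem flatMap_id (a b c d : Int) (l : List Char) (s : Int)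
    (h : ∀ j, s ≤ j → j < s + l.length → preTag a b c d j = [] ∧ postTag a b c d j = []) :
    (PySem.List.enumerate l s).flatMap (fTag a b c d) = l := by
  induction l generalizing s with
  | nil => simp [PySem.List.enumerate_nil]
  | cons x xs ih =>
    rw [PySem.List.enumerate_cons]
    have hs := h s le_rfl (by rw [List.length_cons]; push_cast; omega)
    simp only [List.flatMap_cons, fTag, hs.1, hs.2]
    rw [ih (s+1) (by intro j h1 h2; exact h j (by omega) (by rw [List.length_cons]; push_cast at h2 ⊢; omega))]
    simp

-- the splice loop reproduces the flatMap over the remaining suffix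
theorem splice_loop (a b c d : Int) (cs : List Char)
    (evs : List (Int × List Char × List Char)) (parts : List (List Char)) (prev : Int)
    (hprev : 0 ≤ prev)
    (hpw : evs.Pairwise (fun e e' => e.1 < e'.1))
    (hmem : ∀ e ∈ evs, prev ≤ e.1 ∧ e.1 < (cs.length : Int) ∧
            e.2.1 = preTag a b c d e.1 ∧ e.2.2 = postTag a b c d e.1)
    (hcomp : ∀ j, prev ≤ j → j < (cs.length : Int) → (∀ e ∈ evs, e.1 ≠ j) →
            preTag a b c d j = [] ∧ postTag a b c d j = []) :
    ((evs.foldl (spliceStep cs) (parts, prev)).1 ++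
      [PySem.List.slice cs (some ((evs.foldl (spliceStep cs) (parts, prev)).2)) none]).flatten
    = parts.flatten ++ (PySem.List.enumerate (cs.drop prev.toNat) prev).flatMap (fTag a b c d) := by
  induction evs generalizing parts prev with
  | nil =>
    simp only [List.foldl_nil]
    rw [PySem.List.slice_from _ hprev]
    rw [flatMap_id a b c d _ prev (by
      intro j h1 h2
      refine hcomp j h1 ?_ (by simp)
      rw [List.length_drop] at h2
      omega)]
    simp
  | cons e rest ih =>
    obtain ⟨p, pre, post⟩ := e
    rw [List.pairwise_cons] at hpw
    obtain ⟨hp1, hp2, hpre, hpost⟩ := hmem _ (List.mem_cons_self)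
    dsimp only at hp1 hp2 hpre hpost
    have hp0 : 0 ≤ p := le_trans hprev hp1
    have hlt : p.toNat < cs.length := by omega
    have hvp : prev.toNat ≤ p.toNat := by omega
    simp only [List.foldl_cons]
    rw [show spliceStep cs (parts, prev) (p, pre, post)
        = (parts ++ [PySem.List.slice cs (some prev) (some p) ++ pre ++
            ((PySem.List.pyGet? cs p).elim [] (fun c => [c])) ++ post], p + 1) from rfl]
    rw [ih _ _ (by omega)
      hpw.2
      (by intro e he
          have h3 := hmem e (List.mem_cons_of_mem _ he)
          exact ⟨by have := hpw.1 e he; omega, h3.2.1, h3.2.2⟩)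
      (by intro j h1 h2 h3
          refine hcomp j (by omega) h2 ?_
          intro e he
          rcases List.mem_cons.1 he with h4 | h4
          · subst h4; simp; omega
          · exact h3 e h4)]
    have hsl : PySem.List.slice cs (some prev) (some p)
        = (cs.drop prev.toNat).take (p.toNat - prev.toNat) :=
      PySem.List.slice_toNat cs hprev hp0
    have hget : (PySem.List.pyGet? cs p).elim [] (fun c => [c]) = [cs[p.toNat]] := by
      rw [PySem.List.pyGet?_eq_some_getElem cs hp0 (by omega)]
      rfl
    have hdec : cs.drop prev.toNat
        = (cs.drop prev.toNat).take (p.toNat - prev.toNat) ++ (cs[p.toNat] :: cs.drop (p.toNat + 1)) := by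
      conv_lhs => rw [← List.take_append_drop (p.toNat - prev.toNat) (cs.drop prev.toNat)]
      rw [List.drop_drop, show prev.toNat + (p.toNat - prev.toNat) = p.toNat from by omega,
        List.drop_eq_getElem_cons hlt]
    have hlen : ((cs.drop prev.toNat).take (p.toNat - prev.toNat)).length = p.toNat - prev.toNat := by
      simp; omega
    conv_rhs => rw [hdec, PySem.List.enumerate_append]
    rw [hlen]
    have hcast : prev + ((p.toNat - prev.toNat : Nat) : Int) = p := by omega
    rw [hcast, PySem.List.enumerate_cons]
    rw [List.flatMap_append]
    rw [flatMap_id a b c d ((cs.drop prev.toNat).take (p.toNat - prev.toNat)) prev (by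
      intro j h1 h2
      rw [hlen] at h2
      refine hcomp j h1 (by omega) ?_
      intro e he
      rcases List.mem_cons.1 he with h4 | h4
      · subst h4; simp; omega
      · have := hpw.1 e h4; omega)]
    simp only [List.flatMap_cons, fTag]
    have htp : (p + 1).toNat = p.toNat + 1 := by omega
    rw [htp, hpre, hpost]
    simp [hsl, hget, List.append_assoc]

theorem mem_bStep {n : Int} {evs : List (Int × List Char × List Char)} {cand e} :
    e ∈ bStep n evs cand ↔
      e ∈ evs ∨ (0 ≤ cand.1 ∧ cand.1 < n ∧ (∀ e' ∈ evs, e'.1 ≠ cand.1) ∧ e = cand) := by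
  unfold bStep
  split_ifs with h <;> simp [List.all_eq_true] at h ⊢ <;> tauto

theorem subset_bStep {n : Int} {evs : List (Int × List Char × List Char)} {cand e}
    (h : e ∈ evs) : e ∈ bStep n evs cand := by
  unfold bStep; split_ifs <;> simp_all

theorem key_bStep {n : Int} {evs : List (Int × List Char × List Char)} {cand}
    (h1 : 0 ≤ cand.1) (h2 : cand.1 < n) : ∃ e ∈ bStep n evs cand, e.1 = cand.1 := by
  unfold bStep
  split_ifs with h
  · exact ⟨cand, by simp, rfl⟩
  · simp only [h1, h2, true_and, List.all_eq_true, decide_eq_true_eq] at h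
    push_neg at h
    obtain ⟨e, he, hk⟩ := h
    exact ⟨e, he, hk⟩

theorem nodupkeys_bStep {n : Int} {evs : List (Int × List Char × List Char)} {cand}
    (h : (evs.map (·.1)).Nodup) : ((bStep n evs cand).map (·.1)).Nodup := by
  unfold bStep
  split_ifs with h2
  · rw [List.map_append, List.nodup_append]
    refine ⟨h, by simp, ?_⟩
    intro x hx y hy
    simp only [List.map_cons, List.map_nil, List.mem_singleton] at hy
    subst hy
    simp only [List.mem_map] at hx
    obtain ⟨e, he, hk⟩ := hx
    simp only [List.all_eq_true, decide_eq_true_eq] at h2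
    exact fun heq => h2.2.2 e he (hk.trans heq)
  · exact h

-- B's candidate loop, written out
def evList (a b c d n : Int) : List (Int × List Char × List Char) :=
  bStep n (bStep n (bStep n (bStep n []
    (a, "[E1]".toList, if a = b then "[/E1]".toList else []))
    (b, [], "[/E1]".toList))
    (c, "[E2]".toList, if c = d then "[/E2]".toList else []))
    (d, [], "[/E2]".toList)

theorem events_mem (a b c d n : Int) :
    ∀ e ∈ evList a b c d n,
      0 ≤ e.1 ∧ e.1 < n ∧ e.2.1 = preTag a b c d e.1 ∧ e.2.2 = postTag a b c d e.1 := by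
  intro e he
  unfold evList at he
  rcases mem_bStep.1 he with he3 | hc4
  · rcases mem_bStep.1 he3 with he2 | hc3
    · rcases mem_bStep.1 he2 with he1 | hc2
      · rcases mem_bStep.1 he1 with he0 | hc1
        · simp at he0
        · -- e is the ent1_start event
          obtain ⟨h0, h1, -, he⟩ := hc1
          subst he
          exact ⟨h0, h1, by simp [preTag], by simp [postTag]⟩
      · -- e is the ent1_end event
        obtain ⟨h0, h1, hdist, he⟩ := hc2
        subst he
        have hba : b ≠ a := by
          by_cases hain : 0 ≤ a ∧ a < n
          · obtain ⟨e', he', hk⟩ := key_bStep (evs := ([] : List (Int × List Char × List Char)))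
              (n := n) (cand := (a, "[E1]".toList, if a = b then "[/E1]".toList else []))
              hain.1 hain.2
            intro heq
            exact hdist e' he' (by rw [hk]; exact heq.symm)
          · simp at h0 h1 ⊢; omega
        refine ⟨h0, h1, ?_, ?_⟩ <;> simp [preTag, postTag, hba]
    · -- e is the ent2_start event
      obtain ⟨h0, h1, hdist, he⟩ := hc3
      subst he
      have hca : c ≠ a := by
        by_cases hain : 0 ≤ a ∧ a < n
        · obtain ⟨e', he', hk⟩ := key_bStep (evs := ([] : List (Int × List Char × List Char)))
            (n := n) (cand := (a, "[E1]".toList, if a = b then "[/E1]".toList else []))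
            hain.1 hain.2
          intro heq
          exact hdist e' (subset_bStep he') (by rw [hk]; exact heq.symm)
        · simp at h0 h1 ⊢; omega
      have hcb : c ≠ b := by
        by_cases hbin : 0 ≤ b ∧ b < n
        · obtain ⟨e', he', hk⟩ := key_bStep
            (n := n) (cand := (b, ([] : List Char), "[/E1]".toList)) hbin.1 hbin.2
          intro heq
          exact hdist e' he' (by rw [hk]; exact heq.symm)
        · simp at h0 h1 ⊢; omega
      refine ⟨h0, h1, ?_, ?_⟩ <;> simp [preTag, postTag, hca, hcb]
  · -- e is the ent2_end event
    obtain ⟨h0, h1, hdist, he⟩ := hc4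
    subst he
    have hda : d ≠ a := by
      by_cases hain : 0 ≤ a ∧ a < n
      · obtain ⟨e', he', hk⟩ := key_bStep (evs := ([] : List (Int × List Char × List Char)))
          (n := n) (cand := (a, "[E1]".toList, if a = b then "[/E1]".toList else []))
          hain.1 hain.2
        intro heq
        exact hdist e' (subset_bStep (subset_bStep he')) (by rw [hk]; exact heq.symm)
      · simp at h0 h1 ⊢; omega
    have hdb : d ≠ b := by
      by_cases hbin : 0 ≤ b ∧ b < n
      · obtain ⟨e', he', hk⟩ := key_bStep
          (n := n) (cand := (b, ([] : List Char), "[/E1]".toList)) hbin.1 hbin.2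
        intro heq
        exact hdist e' (subset_bStep he') (by rw [hk]; exact heq.symm)
      · simp at h0 h1 ⊢; omega
    have hdc : d ≠ c := by
      by_cases hcin : 0 ≤ c ∧ c < n
      · obtain ⟨e', he', hk⟩ := key_bStep
          (n := n) (cand := (c, "[E2]".toList, if c = d then "[/E2]".toList else [])) hcin.1 hcin.2
        intro heq
        exact hdist e' he' (by rw [hk]; exact heq.symm)
      · simp at h0 h1 ⊢; omega
    refine ⟨h0, h1, ?_, ?_⟩ <;> simp [preTag, postTag, hda, hdb, hdc]

theorem events_nodup (a b c d n : Int) : ((evList a b c d n).map (·.1)).Nodup := by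
  unfold evList
  exact nodupkeys_bStep (nodupkeys_bStep (nodupkeys_bStep (nodupkeys_bStep (by simp))))

theorem events_complete (a b c d n j : Int) (h0 : 0 ≤ j) (hn : j < n)
    (h : ∀ e ∈ evList a b c d n, e.1 ≠ j) :
    preTag a b c d j = [] ∧ postTag a b c d j = [] := by
  unfold evList at h
  have hja : j ≠ a := by
    intro heq; subst heq
    obtain ⟨e', he', hk⟩ := key_bStep (evs := ([] : List (Int × List Char × List Char)))
      (n := n) (cand := (j, "[E1]".toList, if j = b then "[/E1]".toList else [])) h0 hn
    exact h e' (subset_bStep (subset_bStep (subset_bStep he'))) hk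
  have hjb : j ≠ b := by
    intro heq; subst heq
    obtain ⟨e', he', hk⟩ := key_bStep
      (n := n) (cand := (j, ([] : List Char), "[/E1]".toList)) h0 hn
    exact h e' (subset_bStep (subset_bStep he')) hk
  have hjc : j ≠ c := by
    intro heq; subst heq
    obtain ⟨e', he', hk⟩ := key_bStep
      (n := n) (cand := (j, "[E2]".toList, if j = d then "[/E2]".toList else [])) h0 hn
    exact h e' (subset_bStep he') hk
  have hjd : j ≠ d := by
    intro heq; subst heq
    obtain ⟨e', he', hk⟩ := key_bStep
      (n := n) (cand := (j, ([] : List Char), "[/E2]".toList)) h0 hn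
    exact h e' he' hk
  constructor <;> simp [preTag, postTag, hja, hjb, hjc, hjd]

-- ===== VERDICT (by name: the statement is the Claim_ definition above) =====
theorem insert_ent_tag_spec : Claim_equal_insert_ent_tag := by
  intro text a b c d _
  unfold Spec_insert_ent_tag
  rw [a_eq_flatMap]
  unfold insert_ent_tag_alt
  dsimp only
  rw [show List.foldl (bStep (PySem.List.len text.toList)) []
      [(a, "[E1]".toList, if a = b then "[/E1]".toList else []),
       (b, [], "[/E1]".toList),
       (c, "[E2]".toList, if c = d then "[/E2]".toList else []),
       (d, [], "[/E2]".toList)]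
      = evList a b c d ((text.toList.length : Int)) from by
    rw [PySem.List.len_eq]; rfl]
  set cs := text.toList with hcs
  set E := evList a b c d ((cs.length : Int)) with hE
  set S := PySem.List.sorted E (fun e => e.1) false with hS
  have hperm : S.Perm E := PySem.List.sorted_perm E (fun e => e.1) false
  have hle : S.Pairwise (fun e e' => e.1 ≤ e'.1) := PySem.List.sorted_pairwise E (fun e => e.1)
  have hnd : (S.map (·.1)).Nodup := (hperm.map (·.1)).nodup_iff.mpr (events_nodup a b c d _)
  have hne : S.Pairwise (fun e e' => e.1 ≠ e'.1) := List.pairwise_map.mp hnd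
  have hlt : S.Pairwise (fun e e' => e.1 < e'.1) :=
    (hle.and hne).imp (fun h => lt_of_le_of_ne h.1 h.2)
  have hmem : ∀ e ∈ S, (0:Int) ≤ e.1 ∧ e.1 < (cs.length : Int) ∧
      e.2.1 = preTag a b c d e.1 ∧ e.2.2 = postTag a b c d e.1 := by
    intro e he
    exact events_mem a b c d _ e (hperm.mem_iff.mp he)
  have hcomp : ∀ j, (0:Int) ≤ j → j < (cs.length : Int) → (∀ e ∈ S, e.1 ≠ j) →
      preTag a b c d j = [] ∧ postTag a b c d j = [] := by
    intro j h1 h2 h3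
    exact events_complete a b c d _ j h1 h2 (fun e he => h3 e (hperm.mem_iff.mpr he))
  have := splice_loop a b c d cs S [] 0 le_rfl hlt hmem hcomp
  simp only [Int.toNat_zero, List.drop_zero, List.flatten_nil, List.nil_append] at this
  rw [this]
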